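-- pv_equiv track=rewrite | github.com/mattfeng/rosetta-tools | recces/bin/kalli_setup_util_NEED_TO_INTEGRATE/turner_util1.py | seq_parse
-- ===== SOURCE A (Python) =====
-- def seq_parse(seq):
--     """Parse Rosetta style sequence into list
--
--     Parameters
--     ----------
--     seq : Rosetta-style sequence, e.g. auZ[IGU]g
--
--     Returns
--     -------
--     parsed_seq : parsed sequence in Python tuple, e.g. ('a', 'u', 'Z[IGU]',
--     'g')
--     """
--     in_brac = False
--     parsed_seq = []
--     if not seq:
--         return parsed_seq
--     i = 0
--     for j, c in enumerate(seq):
--         if j == 0: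
--             continue
--         if in_brac:
--             if c == ']':
--                 in_brac = False
--         elif c == '[':
--             in_brac = True
--         else:
--             parsed_seq.append(seq[i:j])
--             i = j
--     parsed_seq.append(seq[i:])
--     return tuple(parsed_seq)
-- ===== SOURCE B (Python) =====
-- def seq_parse(seq):
--     """Parse Rosetta style sequence into a tuple of tokens.
--
--     Stack-based tokenizer: each token is one base character followed by any
--     bracket groups that immediately follow it (an unterminated group runs to
--     the end of the string).
--     """
--     if not seq:
--         return []
--     toks = []
--     s = list(reversed(seq))  # stack of pending characters, next one on top
--     while s:
--         tok = [s.pop()]                 # the base character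
--         while s and s[-1] == '[':       # absorb following bracket groups
--             while s:                    # one group: up to and incl. ']'
--                 ch = s.pop()
--                 tok.append(ch)
--                 if ch == ']':
--                     break
--         toks.append(''.join(tok))
--     return tuple(toks)
-- ===== Notes on version B (the rewrite author's own statement) =====
-- stated objective: alternative
-- what changed: Replaces A's index/flag scan (in_brac boolean, slice bookkeeping with i/j over enumerate) by a direct stack-based tokenizer that pops one base character and then greedily consumes whole bracket groups per token.
import Mathlib
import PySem

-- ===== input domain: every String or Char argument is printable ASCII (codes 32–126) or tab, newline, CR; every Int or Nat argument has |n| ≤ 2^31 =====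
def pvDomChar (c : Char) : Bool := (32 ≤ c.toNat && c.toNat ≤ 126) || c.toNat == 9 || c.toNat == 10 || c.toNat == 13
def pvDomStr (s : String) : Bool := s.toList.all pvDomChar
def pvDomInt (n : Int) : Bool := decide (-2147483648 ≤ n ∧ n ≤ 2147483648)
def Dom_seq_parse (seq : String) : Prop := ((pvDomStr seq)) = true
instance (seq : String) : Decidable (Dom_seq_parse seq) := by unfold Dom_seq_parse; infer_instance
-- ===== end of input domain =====

-- B is an alternative, stack-based tokenizer (pop one base char, then greedily
-- consume whole bracket groups); same O(n) cost as A's index/flag scan.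

-- ===== PORT A =====
-- loop body of A's `for j, c in enumerate(seq)`; state = (in_brac, parsed_seq, i)
def stepA (l : List Char) (st : Bool × List String × Int) (jc : Int × Char) :
    Bool × List String × Int :=
  let (in_brac, parsed, i) := st
  let (j, c) := jc
  if j = 0 then (in_brac, parsed, i)                -- continue
  else if in_brac then
    (if c = ']' then (false, parsed, i) else (in_brac, parsed, i))
  else if c = '[' then (true, parsed, i)
  else (in_brac, parsed ++ [String.ofList (PySem.List.slice l (some i) (some j))], j)

def seq_parse (seq : String) : List String :=
  let l := seq.toList
  if l = [] then []                                  -- `if not seq: return parsed_seq`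
  else
    let st := (PySem.List.enumerate l 0).foldl (stepA l) (false, ([] : List String), (0 : Int))
    st.2.1 ++ [String.ofList (PySem.List.slice l (some st.2.2) none)]   -- parsed_seq.append(seq[i:])

-- ===== PORT B =====
-- Source B keeps the pending characters as a reversed stack and pops from its end;
-- the port consumes the same characters from the front of a list (same sequence
-- of characters, same intermediate tokens).

-- innermost `while s:` of Source B: consume one bracket-group body up to and
-- including ']' (or to the end); returns (consumed chars, remaining stack)
def eatGroup : List Char → List Char × List Char
  | [] => ([], [])
  | ch :: s => if ch = ']' then ([ch], s)
               else let p := eatGroup s; (ch :: p.1, p.2)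

theorem eatGroup_len (s : List Char) : (eatGroup s).2.length ≤ s.length := by
  induction s with
  | nil => simp [eatGroup]
  | cons ch s ih =>
    simp only [eatGroup]
    split
    · simp
    · simpa using Nat.le_succ_of_le ih

-- middle `while s and s[-1] == '[':` of Source B: absorb following bracket groups
def eatGroups : List Char → List Char × List Char
  | [] => ([], [])
  | c :: s =>
    if c = '[' then
      let p := eatGroup s
      let q := eatGroups p.2
      (c :: (p.1 ++ q.1), q.2)
    else ([], c :: s)
termination_by l => l.length
decreasing_by exact Nat.lt_succ_of_le (eatGroup_len s)

theorem eatGroups_len (s : List Char) : (eatGroups s).2.length ≤ s.length := by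
  match s with
  | [] => simp [eatGroups]
  | c :: s =>
    simp only [eatGroups]
    split
    · have h1 := eatGroup_len s
      have h2 := eatGroups_len (eatGroup s).2
      simp only [List.length_cons] at h2 ⊢
      omega
    · simp
termination_by s.length
decreasing_by exact Nat.lt_succ_of_le (eatGroup_len s)

-- outer `while s:` of Source B: one base char then its groups, per token
def goB : List Char → List String
  | [] => []
  | c :: s =>
    let p := eatGroups s
    String.ofList (c :: p.1) :: goB p.2
termination_by l => l.length
decreasing_by exact Nat.lt_succ_of_le (eatGroups_len s)

def seq_parse_alt (seq : String) : List String :=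
  if seq.toList = [] then [] else goB seq.toList

-- ===== PRECONDITION & SPEC =====
def Spec_seq_parse (seq : String) (out : List String) : Prop := out = seq_parse_alt seq
instance (seq : String) (out : List String) : Decidable (Spec_seq_parse seq out) := by unfold Spec_seq_parse; infer_instance

-- ===== CLAIM (what is proved, stated in full; the proofs are below) =====
def Claim_equal_seq_parse : Prop := ∀ (seq : String), Dom_seq_parse seq → Spec_seq_parse seq (seq_parse seq)

-- ===== LEMMAS AND PROOFS =====

-- abstract character-level view of A's loop: pend = chars of the token being
-- built (seq[i:j]), s = the not-yet-scanned suffix; returns all tokens left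
def fA : Bool → List Char → List Char → List (List Char)
  | _, pend, [] => [pend]
  | true, pend, c :: s =>
      if c = ']' then fA false (pend ++ [c]) s else fA true (pend ++ [c]) s
  | false, pend, c :: s =>
      if c = '[' then fA true (pend ++ [c]) s else pend :: fA false [c] s

-- in-bracket scanning of fA is exactly eatGroup
theorem fA_true_eq (s : List Char) : ∀ pend,
    fA true pend s = fA false (pend ++ (eatGroup s).1) (eatGroup s).2 := by
  induction s with
  | nil => intro pend; simp [fA, eatGroup]
  | cons c s ih =>
    intro pend
    by_cases hc : c = ']'
    · simp [fA, eatGroup, hc]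
    · simp [fA, eatGroup, hc, ih]

-- fA from the out-of-bracket state is B's tokenizer
theorem fA_false_eq (s pend : List Char) :
    (fA false pend s).map String.ofList
      = String.ofList (pend ++ (eatGroups s).1) :: goB (eatGroups s).2 := by
  match s with
  | [] => simp [fA, eatGroups, goB]
  | c :: s =>
    by_cases hc : c = '['
    · have hrec := fA_false_eq (eatGroup s).2 (pend ++ [c] ++ (eatGroup s).1)
      simp only [fA, if_pos hc, fA_true_eq, eatGroups]
      simp only [List.append_assoc, List.cons_append, List.nil_append] at hrec ⊢
      rw [hrec]
    · have hrec := fA_false_eq s [c]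
      simp only [fA, if_neg hc, List.map_cons, hrec, eatGroups]
      simp only [goB]
      simp
termination_by s.length
decreasing_by
  all_goals first
    | exact Nat.lt_succ_self _
    | exact Nat.lt_succ_of_le (eatGroup_len s)

-- A's fold, started at position j ≥ 1 with token-start i and pending chars
-- pend = l[i:j], computes fA on the remaining suffix
theorem foldA_eq (s : List Char) : ∀ (j i : Nat) (in_brac : Bool)
    (parsed : List String) (pend l : List Char),
    1 ≤ j → l.drop j = s → l.drop i = pend ++ s → pend.length = j - i → i ≤ j →
    (let st := (PySem.List.enumerate s (j : Int)).foldl (stepA l) (in_brac, parsed, (i : Int));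
     st.2.1 ++ [String.ofList (PySem.List.slice l (some st.2.2) none)])
      = parsed ++ (fA in_brac pend s).map String.ofList := by
  induction s with
  | nil =>
    intro j i in_brac parsed pend l hj hdj hdi hlen hij
    simp only [PySem.List.enumerate_nil, List.foldl_nil]
    rw [PySem.List.slice_from _ (by positivity)]
    simp only [Int.toNat_natCast]
    simp [fA, hdi]
  | cons c s ih =>
    intro j i in_brac parsed pend l hj hdj hdi hlen hij
    have hjlen : j < l.length := by
      have := congrArg List.length hdj; simp at this; omega
    have hdj' : l.drop (j + 1) = s := by
      have : l.drop (j+1) = (l.drop j).drop 1 := by rw [List.drop_drop]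
      rw [this, hdj]; rfl
    simp only [PySem.List.enumerate_cons, List.foldl_cons]
    have hjne : ¬ ((j : Int) = 0) := by
      simp; omega
    match in_brac with
    | true =>
      by_cases hc : c = ']'
      · simp only [stepA, if_neg hjne, hc]
        have := ih (j+1) i false parsed (pend ++ [']']) l (by omega) (by simpa using hdj')
          (by rw [hdi, hc]; simp) (by simp; omega) (by omega)
        push_cast at this ⊢
        rw [this]
        simp [fA]
      · simp only [stepA, if_neg hjne, if_neg hc]
        have := ih (j+1) i true parsed (pend ++ [c]) l (by omega) (by simpa using hdj')
          (by rw [hdi]; simp) (by simp; omega) (by omega)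
        push_cast at this ⊢
        rw [this]
        simp [fA, hc]
    | false =>
      by_cases hc : c = '['
      · simp only [stepA, if_neg hjne, hc, Bool.false_eq_true]
        have := ih (j+1) i true parsed (pend ++ ['[']) l (by omega) (by simpa using hdj')
          (by rw [hdi, hc]; simp) (by simp; omega) (by omega)
        push_cast at this ⊢
        rw [this]
        simp [fA]
      · have hslice : PySem.List.slice l (some (i : Int)) (some (j : Int)) = pend := by
          rw [PySem.List.slice_natCast]
          rw [hdi, List.take_append_of_le_length (by omega)]
          exact List.take_of_length_le (by omega)
        simp only [stepA, if_neg hjne, if_neg (by simp : ¬ (false = true)), if_neg hc, hslice]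
        have := ih (j+1) j false (parsed ++ [String.ofList pend]) [c] l (by omega)
          (by simpa using hdj') (by rw [hdj]; rfl) (by simp) (by omega)
        push_cast at this ⊢
        rw [this]
        simp [fA, hc]

-- ===== VERDICT (by name: the statement is the Claim_ definition above) =====
theorem seq_parse_spec : Claim_equal_seq_parse := by
  intro seq _
  unfold Spec_seq_parse seq_parse seq_parse_alt
  cases hl : seq.toList with
  | nil => simp
  | cons c rest =>
    simp only [if_neg (by simp : ¬ (c :: rest = []))]
    have h0 : PySem.List.enumerate (c :: rest) (0 : Int)
        = (0, c) :: PySem.List.enumerate rest (1 : Int) := by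
      rw [PySem.List.enumerate_cons]; norm_num
    have hstep0 : stepA (c :: rest) (false, ([] : List String), (0 : Int)) (0, c)
        = (false, [], 0) := by simp [stepA]
    have hmain := foldA_eq rest 1 0 false [] [c] (c :: rest)
      (by omega) (by simp) (by simp) (by simp) (by omega)
    have hB := fA_false_eq rest [c]
    simp only [h0, List.foldl_cons, hstep0]
    norm_num at hmain
    rw [hmain, hB]
    simp [goB]
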